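-- pv_equiv track=rewrite | github.com/foreveryh/django-excel-import | sqlite3-to-mysql.py | _removeNewline
-- ===== SOURCE A (Python) =====
-- def _removeNewline(line, in_string):
--     new = ''
--     for c in line:
--         if not in_string:
--             if c == "'":
--                 in_string = True
--         elif c == "'":
--             in_string = False
--         elif in_string:
--             if c == "\n":
--                  new = new + 'Newline333'
--                  continue
--             if c == "\r":
--                  new = new + 'carriagereturn333'
--                  continue
--         new = new + c
--     return new, in_string
-- ===== SOURCE B (Python) =====
-- def _removeNewline(line, in_string):
--     parts = line.split("'")
--     new_parts = [
--         ''.join('Newline333' if c == '\n' else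
--                 'carriagereturn333' if c == '\r' else c
--                 for c in p)
--         if bool(in_string) ^ (i % 2 == 1) else p
--         for i, p in enumerate(parts)
--     ]
--     return "'".join(new_parts), bool(in_string) ^ (len(parts) % 2 == 0)
-- ===== Notes on version B (the rewrite author's own statement) =====
-- stated objective: idiomatic
-- what changed: Replaced A's stateful per-character scan (toggling in_string and concatenating char by char) with line.split("'"), a comprehension that rewrites newline/CR only in the quote-parity-selected segments, and a rejoin, computing the final flag from the segment count's parity.
import Mathlib
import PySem

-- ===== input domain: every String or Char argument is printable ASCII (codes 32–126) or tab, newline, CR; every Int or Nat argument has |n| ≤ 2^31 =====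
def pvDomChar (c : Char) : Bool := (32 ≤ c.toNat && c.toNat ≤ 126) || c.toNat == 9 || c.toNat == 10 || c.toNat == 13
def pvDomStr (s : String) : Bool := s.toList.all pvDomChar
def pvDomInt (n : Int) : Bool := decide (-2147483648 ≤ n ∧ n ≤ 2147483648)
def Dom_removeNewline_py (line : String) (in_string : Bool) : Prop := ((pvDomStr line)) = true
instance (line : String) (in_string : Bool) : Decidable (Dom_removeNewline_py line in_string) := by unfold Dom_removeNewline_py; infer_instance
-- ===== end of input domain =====

-- B replaces A's stateful per-character scan by split-on-quote / map over alternating segments / rejoin; objective: idiomatic, same cost.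

-- ===== PORT A =====
-- one step of A's for-loop: state = (characters of `new` so far, in_string)
def removeNewline_py_step (st : List Char × Bool) (c : Char) : List Char × Bool :=
  if !st.2 then
    (st.1 ++ [c], if c = '\'' then true else st.2)
  else if c = '\'' then (st.1 ++ [c], false)
  else if c = '\n' then (st.1 ++ "Newline333".toList, st.2)
  else if c = '\r' then (st.1 ++ "carriagereturn333".toList, st.2)
  else (st.1 ++ [c], st.2)

def removeNewline_py (line : String) (in_string : Bool) : String × Bool :=
  let r := line.toList.foldl removeNewline_py_step ([], in_string)
  (String.ofList r.1, r.2)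

-- ===== PORT B =====
-- ''.join('Newline333' if c == '\n' else 'carriagereturn333' if c == '\r' else c for c in p)
def removeNewline_py_fix (p : List Char) : List Char :=
  p.flatMap (fun c =>
    if c = '\n' then "Newline333".toList
    else if c = '\r' then "carriagereturn333".toList
    else [c])

def removeNewline_py_alt (line : String) (in_string : Bool) : String × Bool :=
  let parts := line.toList.splitOn '\''
  let newParts := (PySem.List.enumerate parts).map (fun ip =>
    if in_string ^^ (PySem.Int.mod ip.1 2 == 1) then removeNewline_py_fix ip.2 else ip.2)
  (String.ofList (PySem.Chars.join ['\''] newParts), in_string ^^ (parts.length % 2 == 0))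

-- ===== PRECONDITION & SPEC =====
def Spec_removeNewline_py (line : String) (in_string : Bool) (out : String × Bool) : Prop := out = removeNewline_py_alt line in_string
instance (line : String) (in_string : Bool) (out : String × Bool) : Decidable (Spec_removeNewline_py line in_string out) := by unfold Spec_removeNewline_py; infer_instance

-- ===== CLAIM (what is proved, stated in full; the proofs are below) =====
def Claim_equal_removeNewline_py : Prop := ∀ (line : String) (in_string : Bool), Dom_removeNewline_py line in_string → Spec_removeNewline_py line in_string (removeNewline_py line in_string)

-- ===== LEMMAS AND PROOFS =====

-- the alternating rewrite-and-rejoin that both programs compute: segment parity flips at each quote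
def rnJ (b : Bool) : List (List Char) → List Char
  | [] => []
  | [p] => if b then removeNewline_py_fix p else p
  | p :: q :: ps => (if b then removeNewline_py_fix p else p) ++ '\'' :: rnJ (!b) (q :: ps)

theorem splitOn_ne_nil (cs : List Char) : cs.splitOn '\'' ≠ [] :=
  List.splitOnP_ne_nil _ cs

theorem rnJ_modifyHead (b : Bool) (c : Char) (parts : List (List Char)) (hp : parts ≠ []) :
    rnJ b (parts.modifyHead (c :: ·))
      = (if b then removeNewline_py_fix [c] else [c]) ++ rnJ b parts := by
  match parts with
  | [p] =>
    cases b <;> simp [rnJ, removeNewline_py_fix]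
  | p :: q :: ps =>
    cases b <;> simp [rnJ, removeNewline_py_fix]

theorem rnA_eq_J (cs : List Char) : ∀ (acc : List Char) (ins : Bool),
    cs.foldl removeNewline_py_step (acc, ins)
      = (acc ++ rnJ ins (cs.splitOn '\''), ins ^^ ((cs.count '\'') % 2 == 1)) := by
  induction cs with
  | nil =>
    intro acc ins
    cases ins <;> simp [List.splitOn, rnJ, removeNewline_py_fix]
  | cons c cs ih =>
    intro acc ins
    rw [List.foldl_cons]
    by_cases hq : c = '\''
    · subst hq
      obtain ⟨p, ps, hps⟩ := List.exists_cons_of_ne_nil (splitOn_ne_nil cs)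
      have hsp : ('\'' :: cs).splitOn '\'' = [] :: cs.splitOn '\'' := by
        simp [List.splitOn, List.splitOnP_cons]
      have hcnt : ('\'' :: cs).count '\'' = cs.count '\'' + 1 := by simp
      cases ins <;>
        simp [removeNewline_py_step, ih, hsp, hps, rnJ, hcnt] <;>
        cases h2 : (cs.count '\'' % 2 == 1) <;>
          simp_all [removeNewline_py_fix] <;> omega
    · have hsp : (c :: cs).splitOn '\'' = (cs.splitOn '\'').modifyHead (c :: ·) := by
        simp [List.splitOn, List.splitOnP_cons, hq]
      have hcnt : (c :: cs).count '\'' = cs.count '\'' := by simp [hq]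
      have hmh := rnJ_modifyHead (b := ins) c _ (splitOn_ne_nil cs)
      cases ins
      · simp [removeNewline_py_step, ih, hsp, hcnt, hmh, hq]
      · by_cases hn : c = '\n'
        · subst hn
          simp [removeNewline_py_step, ih, hsp, hcnt, hmh, removeNewline_py_fix]
        · by_cases hr : c = '\r'
          · subst hr
            simp [removeNewline_py_step, ih, hsp, hcnt, hmh, removeNewline_py_fix, hn]
          · simp [removeNewline_py_step, ih, hsp, hcnt, hmh, removeNewline_py_fix, hq, hn, hr]

theorem rnB_eq_J (in_string : Bool) : ∀ (parts : List (List Char)) (n : Nat),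
    PySem.Chars.join ['\''] ((PySem.List.enumerate parts (n : Int)).map (fun ip =>
      if in_string ^^ (PySem.Int.mod ip.1 2 == 1) then removeNewline_py_fix ip.2 else ip.2))
      = rnJ (in_string ^^ (n % 2 == 1)) parts := by
  intro parts
  induction parts with
  | nil => intro n; simp [PySem.List.enumerate_nil, PySem.Chars.join_nil, rnJ]
  | cons p ps ih =>
    intro n
    match ps with
    | [] =>
      have h2 : (((n : Int)) % 2 == 1) = (n % 2 == 1) := by
        cases h : (n % 2 == 1) <;> simp_all <;> omega
      simp [PySem.List.enumerate_cons, PySem.List.enumerate_nil,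
        PySem.Chars.join_singleton, rnJ, h2]
    | q :: qs =>
      have hm : PySem.Int.mod (n : Int) 2 = ((n % 2 : Nat) : Int) := by
        exact_mod_cast PySem.Int.mod_natCast n 2
      have hmod : (PySem.Int.mod (n : Int) 2 == 1) = (n % 2 == 1) := by
        rw [hm]; cases h : (n % 2 == 1) <;> simp_all <;> omega
      have hcast : ((n : Int) + 1) = ((n + 1 : Nat) : Int) := by push_cast; ring
      have hflip : (in_string ^^ ((n + 1) % 2 == 1)) = !(in_string ^^ (n % 2 == 1)) := by
        cases in_string <;> cases h : (n % 2 == 1) <;> simp_all <;> omega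
      have htail := ih (n + 1)
      rw [hflip] at htail
      simp only [PySem.List.enumerate_cons, List.map_cons] at htail
      rw [PySem.List.enumerate_cons, List.map_cons,
        PySem.List.enumerate_cons (x := q), List.map_cons,
        PySem.Chars.join_cons_cons, hcast, htail]
      cases hb : (in_string ^^ (n % 2 == 1)) <;> simp_all [rnJ]

theorem rn_length_splitOn (cs : List Char) : (cs.splitOn '\'').length = cs.count '\'' + 1 := by
  induction cs with
  | nil => simp [List.splitOn]
  | cons c cs ih =>
    by_cases h : c = '\''
    · subst h; simp_all [List.splitOn, List.splitOnP_cons]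
    · simp_all [List.splitOn, List.splitOnP_cons, List.length_modifyHead]

-- ===== VERDICT (by name: the statement is the Claim_ definition above) =====
theorem removeNewline_py_spec : Claim_equal_removeNewline_py := by
  intro line in_string _
  unfold Spec_removeNewline_py removeNewline_py removeNewline_py_alt
  rw [rnA_eq_J]
  have hB := rnB_eq_J in_string (line.toList.splitOn '\'') 0
  simp only [Nat.cast_zero] at hB ⊢
  rw [hB]
  simp [rn_length_splitOn, Nat.succ_mod_two_eq_zero_iff]
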